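-- pv_equiv track=rewrite | github.com/bh1091/dota2-django-aws | banpick/util.py | generate_option_list
-- ===== SOURCE A (Python) =====
-- def generate_option_list(radiant_pick, radiant_ban, dire_pick, dire_ban):
-- 	# option_list = []
-- 	# for i in range(104):
-- 	# 	option_list.append(str(i+1))
--
-- 	strength_list = '2 7 14 16 18 19 23 28 29 38 42 49 51 54 57 59 60 65 69 71 73 77 78 81 83 85 91 96 97 98 99 100 102 103 104 107 110 '
-- 	agility_list = '1 4 6 8 9 10 11 12 15 20 32 35 40 41 44 46 47 48 56 61 62 63 67 70 72 80 82 88 89 93 94 95 106 109 '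
-- 	intell_list = '3 5 13 17 21 22 25 26 27 30 31 33 34 36 37 39 43 45 50 52 53 55 58 64 66 68 74 75 76 79 84 86 87 90 92 101 '
--
-- 	# option_list = strength_list + agility_list + intell_list
-- 	# option_list = option_list.split()
--
-- 	strength_list = strength_list.split()
-- 	agility_list = agility_list.split()
-- 	intell_list = intell_list.split()
--
-- 	radiant_pick = radiant_pick.split()
-- 	radiant_ban = radiant_ban.split()
-- 	dire_pick = dire_pick.split()
-- 	dire_ban = dire_ban.split()
--
-- 	strength_list = [x for x in strength_list if x not in radiant_pick]
-- 	strength_list = [x for x in strength_list if x not in dire_pick]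
-- 	strength_list = [x for x in strength_list if x not in radiant_ban]
-- 	strength_list = [x for x in strength_list if x not in dire_ban]
--
-- 	agility_list = [x for x in agility_list if x not in radiant_pick]
-- 	agility_list = [x for x in agility_list if x not in dire_pick]
-- 	agility_list = [x for x in agility_list if x not in radiant_ban]
-- 	agility_list = [x for x in agility_list if x not in dire_ban]
--
-- 	intell_list = [x for x in intell_list if x not in radiant_pick]
-- 	intell_list = [x for x in intell_list if x not in dire_pick]
-- 	intell_list = [x for x in intell_list if x not in radiant_ban]
-- 	intell_list = [x for x in intell_list if x not in dire_ban]
--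
-- 	option_list = [strength_list,agility_list,intell_list]
--
-- 	# option_list = [x for x in option_list if x not in radiant_pick]
-- 	# option_list = [x for x in option_list if x not in dire_pick]
-- 	# option_list = [x for x in option_list if x not in radiant_ban]
-- 	# option_list = [x for x in option_list if x not in dire_ban]
-- 	# url_list = generate_image_resource(option_list[1:-1].replace(',',''))
-- 	return option_list
-- ===== SOURCE B (Python) =====
-- def generate_option_list(radiant_pick, radiant_ban, dire_pick, dire_ban):
-- 	strength_list = '2 7 14 16 18 19 23 28 29 38 42 49 51 54 57 59 60 65 69 71 73 77 78 81 83 85 91 96 97 98 99 100 102 103 104 107 110 '.split()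
-- 	agility_list = '1 4 6 8 9 10 11 12 15 20 32 35 40 41 44 46 47 48 56 61 62 63 67 70 72 80 82 88 89 93 94 95 106 109 '.split()
-- 	intell_list = '3 5 13 17 21 22 25 26 27 30 31 33 34 36 37 39 43 45 50 52 53 55 58 64 66 68 74 75 76 79 84 86 87 90 92 101 '.split()
-- 	excluded = set(radiant_pick.split()) | set(dire_pick.split()) | set(radiant_ban.split()) | set(dire_ban.split())
-- 	return [[x for x in lst if x not in excluded]
-- 			for lst in (strength_list, agility_list, intell_list)]
-- ===== Notes on version B (the rewrite author's own statement) =====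
-- stated objective: simpler
-- what changed: Replaces A's four sequential filter passes over each of the three hero lists (12 list comprehensions, each scanning all four pick/ban lists) with one excluded set built once as the union of the four parsed inputs and a single filter pass per hero list.
import Mathlib
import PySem

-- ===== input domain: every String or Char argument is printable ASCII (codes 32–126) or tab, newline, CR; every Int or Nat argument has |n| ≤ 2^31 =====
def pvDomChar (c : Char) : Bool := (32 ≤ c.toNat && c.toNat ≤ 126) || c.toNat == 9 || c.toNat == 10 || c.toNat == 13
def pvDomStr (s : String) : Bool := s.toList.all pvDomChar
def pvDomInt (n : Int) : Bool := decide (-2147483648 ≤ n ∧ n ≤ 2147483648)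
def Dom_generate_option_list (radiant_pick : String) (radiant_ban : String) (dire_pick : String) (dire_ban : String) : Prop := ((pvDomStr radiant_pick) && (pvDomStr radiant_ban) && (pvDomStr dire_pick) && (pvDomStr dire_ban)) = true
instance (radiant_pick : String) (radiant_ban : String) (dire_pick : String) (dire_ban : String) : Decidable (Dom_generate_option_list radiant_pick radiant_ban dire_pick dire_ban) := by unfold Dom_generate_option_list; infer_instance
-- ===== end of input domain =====

-- ===== PORT A =====
-- B builds one excluded set from the four parsed inputs and filters each hero list in a single pass,
-- replacing A's four sequential filter passes per list (simpler; return value only, no side effects).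
def generate_option_list (radiant_pick : String) (radiant_ban : String) (dire_pick : String) (dire_ban : String) : List (List String) :=
  let strength_list := PySem.Str.split₀ "2 7 14 16 18 19 23 28 29 38 42 49 51 54 57 59 60 65 69 71 73 77 78 81 83 85 91 96 97 98 99 100 102 103 104 107 110 "
  let agility_list := PySem.Str.split₀ "1 4 6 8 9 10 11 12 15 20 32 35 40 41 44 46 47 48 56 61 62 63 67 70 72 80 82 88 89 93 94 95 106 109 "
  let intell_list := PySem.Str.split₀ "3 5 13 17 21 22 25 26 27 30 31 33 34 36 37 39 43 45 50 52 53 55 58 64 66 68 74 75 76 79 84 86 87 90 92 101 "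
  let radiant_pick := PySem.Str.split₀ radiant_pick
  let radiant_ban := PySem.Str.split₀ radiant_ban
  let dire_pick := PySem.Str.split₀ dire_pick
  let dire_ban := PySem.Str.split₀ dire_ban
  let strength_list := strength_list.filter (fun x => !(radiant_pick.contains x))
  let strength_list := strength_list.filter (fun x => !(dire_pick.contains x))
  let strength_list := strength_list.filter (fun x => !(radiant_ban.contains x))
  let strength_list := strength_list.filter (fun x => !(dire_ban.contains x))
  let agility_list := agility_list.filter (fun x => !(radiant_pick.contains x))
  let agility_list := agility_list.filter (fun x => !(dire_pick.contains x))
  let agility_list := agility_list.filter (fun x => !(radiant_ban.contains x))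
  let agility_list := agility_list.filter (fun x => !(dire_ban.contains x))
  let intell_list := intell_list.filter (fun x => !(radiant_pick.contains x))
  let intell_list := intell_list.filter (fun x => !(dire_pick.contains x))
  let intell_list := intell_list.filter (fun x => !(radiant_ban.contains x))
  let intell_list := intell_list.filter (fun x => !(dire_ban.contains x))
  [strength_list, agility_list, intell_list]

-- ===== PORT B =====
def generate_option_list_alt (radiant_pick : String) (radiant_ban : String) (dire_pick : String) (dire_ban : String) : List (List String) :=
  let strength_list := PySem.Str.split₀ "2 7 14 16 18 19 23 28 29 38 42 49 51 54 57 59 60 65 69 71 73 77 78 81 83 85 91 96 97 98 99 100 102 103 104 107 110 "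
  let agility_list := PySem.Str.split₀ "1 4 6 8 9 10 11 12 15 20 32 35 40 41 44 46 47 48 56 61 62 63 67 70 72 80 82 88 89 93 94 95 106 109 "
  let intell_list := PySem.Str.split₀ "3 5 13 17 21 22 25 26 27 30 31 33 34 36 37 39 43 45 50 52 53 55 58 64 66 68 74 75 76 79 84 86 87 90 92 101 "
  let excluded : PySem.Set String :=
    PySem.Set.union (PySem.Set.union (PySem.Set.union
      (PySem.Set.ofList (PySem.Str.split₀ radiant_pick))
      (PySem.Set.ofList (PySem.Str.split₀ dire_pick)))
      (PySem.Set.ofList (PySem.Str.split₀ radiant_ban)))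
      (PySem.Set.ofList (PySem.Str.split₀ dire_ban))
  [strength_list, agility_list, intell_list].map
    (fun lst => lst.filter (fun x => !(PySem.Set.contains excluded x)))

-- ===== PRECONDITION & SPEC =====
def Spec_generate_option_list (radiant_pick : String) (radiant_ban : String) (dire_pick : String) (dire_ban : String) (out : List (List String)) : Prop := out = generate_option_list_alt radiant_pick radiant_ban dire_pick dire_ban
instance (radiant_pick : String) (radiant_ban : String) (dire_pick : String) (dire_ban : String) (out : List (List String)) : Decidable (Spec_generate_option_list radiant_pick radiant_ban dire_pick dire_ban out) := by unfold Spec_generate_option_list; infer_instance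

-- ===== CLAIM (what is proved, stated in full; the proofs are below) =====
def Claim_equal_generate_option_list : Prop := ∀ (radiant_pick : String) (radiant_ban : String) (dire_pick : String) (dire_ban : String), Dom_generate_option_list radiant_pick radiant_ban dire_pick dire_ban → Spec_generate_option_list radiant_pick radiant_ban dire_pick dire_ban (generate_option_list radiant_pick radiant_ban dire_pick dire_ban)

-- ===== LEMMAS AND PROOFS =====
-- Four successive filters against the four parsed lists equal one filter against the union-set of the four.
theorem filter_four_eq_filter_union (l rp dp rb db : List String) :
    ((((l.filter (fun x => !(rp.contains x))).filter (fun x => !(dp.contains x))).filter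
        (fun x => !(rb.contains x))).filter (fun x => !(db.contains x)))
    = l.filter (fun x => !(PySem.Set.contains
        (PySem.Set.union (PySem.Set.union (PySem.Set.union
          (PySem.Set.ofList rp) (PySem.Set.ofList dp)) (PySem.Set.ofList rb))
          (PySem.Set.ofList db)) x)) := by
  simp only [List.filter_filter]
  apply List.filter_congr
  intro x _
  have h : PySem.Set.contains
      (PySem.Set.union (PySem.Set.union (PySem.Set.union
        (PySem.Set.ofList rp) (PySem.Set.ofList dp)) (PySem.Set.ofList rb))
        (PySem.Set.ofList db)) x
      = (rp.contains x || dp.contains x || rb.contains x || db.contains x) := by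
    rw [Bool.eq_iff_iff]
    simp [PySem.Set.mem_union, PySem.Set.mem_ofList, or_assoc]
  rw [h]
  cases rp.contains x <;> cases dp.contains x <;> cases rb.contains x <;> cases db.contains x <;> rfl

-- ===== VERDICT (by name: the statement is the Claim_ definition above) =====
theorem generate_option_list_spec : Claim_equal_generate_option_list := by
  intro rp rb dp db _
  unfold Spec_generate_option_list generate_option_list generate_option_list_alt
  simp only [List.map]
  rw [filter_four_eq_filter_union, filter_four_eq_filter_union, filter_four_eq_filter_union]
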